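-- pv_equiv track=rewrite | github.com/arnabdutta04/Context-aware-emotion-detaction- | backend.py | _infer_gender
-- ===== SOURCE A (Python) =====
-- from typing import Optional, List, Dict, Tuple
--
-- _MALE_HINTS   = {
--     "he","him","his","himself","mr","sir","king","prince","duke","lord",
--     "boy","man","men","male","brother","father","son","uncle","nephew",
--     "husband","boyfriend","grandfather","grandson","actor","monk","priest",
-- }
--
-- _FEMALE_HINTS = {
--     "she","her","hers","herself","ms","mrs","miss","madam","queen","princess",
--     "duchess","lady","girl","woman","women","female","sister","mother",
--     "daughter","aunt","niece","wife","girlfriend","grandmother","granddaughter",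
--     "actress","nun","priestess",
-- }
--
-- _PLURAL_HINTS = {
--     "they","them","their","themselves","we","us","our","team","group",
--     "people","children","kids","students","players","members","staff",
-- }
--
-- _ANIMAL_HINTS = {
--     "cat","dog","bird","fish","horse","lion","tiger","bear","elephant",
--     "monkey","snake","rabbit","wolf","fox","deer","cow","bull","sheep",
--     "goat","pig","chicken","duck","eagle","parrot","turtle","frog",
-- }
--
-- _OBJECT_HINTS = {
--     "ball","car","bike","book","phone","laptop","table","chair","bag",
--     "bottle","pen","pencil","camera","watch","ring","key","door","window",
--     "box","bag","cup","plate","knife","sword","gun","ship","plane","train",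
-- }
--
-- _KNOWN_MALE_NAMES: set = {
--     "arnab","rahul","amit","raj","rohan","arjun","vikram","suresh","deepak",
--     "ravi","arun","anand","sanjay","ajay","vijay","nikhil","kartik","aman",
--     "karan","rajan","mohan","ramesh","dinesh","umesh","ganesh","mahesh",
--     "sachin","rohit","virat","dhruv","ishaan","lakshman","devraj","surya",
--     "john","james","robert","william","richard","charles","michael","david",
--     "peter","paul","george","henry","edward","thomas","joseph","mark",
-- }
--
-- _KNOWN_FEMALE_NAMES: set = {
--     "priya","pooja","anita","sunita","kavita","rina","meera","divya","neha",
--     "sneha","radha","sita","lakshmi","parvati","durga","saraswati","rekha",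
--     "usha","geeta","seema","leela","mala","vimla","shobha","sudha","jyoti",
--     "nisha","ritu","sweta","shreya","anjali","komal","sonam","riya","tanya",
--     "emma","olivia","sophia","isabella","charlotte","ava","mia","amelia",
--     "sarah","emily","jessica","ashley","jennifer","samantha","elizabeth","lisa",
-- }
--
-- def _infer_gender(name: str, words_lower: List[str]) -> str:
--     """
--     Infer pronoun gender for a proper-noun entity.
--     Priority order:
--       1. Known-name lookup (most reliable for South Asian / common names)
--       2. Sentence-level hint words
--       3. Unknown fallback
--     """
--     # ── 1. Known-name lookup ────────────────────────────────────────
--     first = name.split()[0].lower()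
--     if first in _KNOWN_MALE_NAMES:   return "masculine"
--     if first in _KNOWN_FEMALE_NAMES: return "feminine"
--
--     # ── 2. Sentence-level hints ─────────────────────────────────────
--     if any(h in words_lower for h in _PLURAL_HINTS):  return "plural"
--     if any(h in words_lower for h in _FEMALE_HINTS):  return "feminine"
--     if any(h in words_lower for h in _MALE_HINTS):    return "masculine"
--     if any(h in words_lower for h in _ANIMAL_HINTS):  return "neuter"
--     if any(h in words_lower for h in _OBJECT_HINTS):  return "neuter"
--
--     return "unknown"
-- ===== SOURCE B (Python) =====
-- from typing import List
--
-- # One combined word -> priority table (plural=0 > feminine=1 > masculine=2 > neuter=3),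
-- # built once from whitespace-joined category strings; known first names in one
-- # name -> gender table.  A single pass over words_lower keeps the minimum priority
-- # (with an early break once 0 is reached) instead of five repeated list scans.
--
-- _LABELS = ["plural", "feminine", "masculine", "neuter", "unknown"]
--
-- _CATEGORY_WORDS = [
--     "they them their themselves we us our team group people children kids "
--     "students players members staff",
--     "she her hers herself ms mrs miss madam queen princess duchess lady girl "
--     "woman women female sister mother daughter aunt niece wife girlfriend "
--     "grandmother granddaughter actress nun priestess",
--     "he him his himself mr sir king prince duke lord boy man men male brother "
--     "father son uncle nephew husband boyfriend grandfather grandson actor monk "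
--     "priest",
--     "cat dog bird fish horse lion tiger bear elephant monkey snake rabbit wolf "
--     "fox deer cow bull sheep goat pig chicken duck eagle parrot turtle frog "
--     "ball car bike book phone laptop table chair bag bottle pen pencil camera "
--     "watch ring key door window box bag cup plate knife sword gun ship plane train",
-- ]
--
-- _PRIO = {}
-- for _p, _words in enumerate(_CATEGORY_WORDS):
--     for _w in _words.split():
--         _PRIO.setdefault(_w, _p)
--
-- _KNOWN = {}
-- for _g, _names in [
--     ("masculine",
--      "arnab rahul amit raj rohan arjun vikram suresh deepak ravi arun anand "
--      "sanjay ajay vijay nikhil kartik aman karan rajan mohan ramesh dinesh "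
--      "umesh ganesh mahesh sachin rohit virat dhruv ishaan lakshman devraj surya "
--      "john james robert william richard charles michael david peter paul "
--      "george henry edward thomas joseph mark"),
--     ("feminine",
--      "priya pooja anita sunita kavita rina meera divya neha sneha radha sita "
--      "lakshmi parvati durga saraswati rekha usha geeta seema leela mala vimla "
--      "shobha sudha jyoti nisha ritu sweta shreya anjali komal sonam riya tanya "
--      "emma olivia sophia isabella charlotte ava mia amelia sarah emily jessica "
--      "ashley jennifer samantha elizabeth lisa"),
-- ]:
--     for _n in _names.split():
--         _KNOWN.setdefault(_n, _g)
--
--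
-- def _infer_gender(name: str, words_lower: List[str]) -> str:
--     first = name.split()[0].lower()
--     g = _KNOWN.get(first)
--     if g is not None:
--         return g
--     best = 4
--     for w in words_lower:
--         if best == 0:
--             break
--         best = min(best, _PRIO.get(w, 4))
--     return _LABELS[best]
-- ===== Notes on version B (the rewrite author's own statement) =====
-- stated objective: faster
-- what changed: Replaced A's five sequential any(h in words_lower) hint-set scans by one combined word-to-priority dict built once from whitespace-joined category strings, a single pass over words_lower keeping the minimum priority with an early break, and a label table; the known-name short-circuit becomes one dict lookup.
import Mathlib
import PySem

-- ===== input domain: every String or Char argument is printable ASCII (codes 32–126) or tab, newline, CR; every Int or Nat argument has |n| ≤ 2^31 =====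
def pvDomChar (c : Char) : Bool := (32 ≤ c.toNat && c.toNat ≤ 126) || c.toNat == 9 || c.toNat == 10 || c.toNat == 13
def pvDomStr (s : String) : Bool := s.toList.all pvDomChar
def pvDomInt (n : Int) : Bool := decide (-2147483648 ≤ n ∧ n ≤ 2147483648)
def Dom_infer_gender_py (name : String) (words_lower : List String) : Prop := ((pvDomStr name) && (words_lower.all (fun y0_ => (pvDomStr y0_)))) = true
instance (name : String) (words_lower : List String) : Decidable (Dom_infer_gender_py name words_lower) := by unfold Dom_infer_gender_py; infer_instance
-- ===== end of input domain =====

-- B replaces A's five sequential hint-set scans by one combined word→priority association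
-- table (built once from whitespace-joined category strings) consulted in a SINGLE pass over
-- words_lower keeping the minimum priority (early break at 0), and one name→gender table for
-- the known-name short-circuit. Objective: faster (one indexed pass instead of five scans).

-- ===== PORT A =====
def maleHints : PySem.Set String := PySem.Set.ofList ["he", "him", "his", "himself", "mr", "sir", "king", "prince", "duke", "lord", "boy", "man", "men", "male", "brother", "father", "son", "uncle", "nephew", "husband", "boyfriend", "grandfather", "grandson", "actor", "monk", "priest"]
def femaleHints : PySem.Set String := PySem.Set.ofList ["she", "her", "hers", "herself", "ms", "mrs", "miss", "madam", "queen", "princess", "duchess", "lady", "girl", "woman", "women", "female", "sister", "mother", "daughter", "aunt", "niece", "wife", "girlfriend", "grandmother", "granddaughter", "actress", "nun", "priestess"]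
def pluralHints : PySem.Set String := PySem.Set.ofList ["they", "them", "their", "themselves", "we", "us", "our", "team", "group", "people", "children", "kids", "students", "players", "members", "staff"]
def animalHints : PySem.Set String := PySem.Set.ofList ["cat", "dog", "bird", "fish", "horse", "lion", "tiger", "bear", "elephant", "monkey", "snake", "rabbit", "wolf", "fox", "deer", "cow", "bull", "sheep", "goat", "pig", "chicken", "duck", "eagle", "parrot", "turtle", "frog"]
def objectHints : PySem.Set String := PySem.Set.ofList ["ball", "car", "bike", "book", "phone", "laptop", "table", "chair", "bag", "bottle", "pen", "pencil", "camera", "watch", "ring", "key", "door", "window", "box", "bag", "cup", "plate", "knife", "sword", "gun", "ship", "plane", "train"]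
def knownMaleNames : PySem.Set String := PySem.Set.ofList ["arnab", "rahul", "amit", "raj", "rohan", "arjun", "vikram", "suresh", "deepak", "ravi", "arun", "anand", "sanjay", "ajay", "vijay", "nikhil", "kartik", "aman", "karan", "rajan", "mohan", "ramesh", "dinesh", "umesh", "ganesh", "mahesh", "sachin", "rohit", "virat", "dhruv", "ishaan", "lakshman", "devraj", "surya", "john", "james", "robert", "william", "richard", "charles", "michael", "david", "peter", "paul", "george", "henry", "edward", "thomas", "joseph", "mark"]
def knownFemaleNames : PySem.Set String := PySem.Set.ofList ["priya", "pooja", "anita", "sunita", "kavita", "rina", "meera", "divya", "neha", "sneha", "radha", "sita", "lakshmi", "parvati", "durga", "saraswati", "rekha", "usha", "geeta", "seema", "leela", "mala", "vimla", "shobha", "sudha", "jyoti", "nisha", "ritu", "sweta", "shreya", "anjali", "komal", "sonam", "riya", "tanya", "emma", "olivia", "sophia", "isabella", "charlotte", "ava", "mia", "amelia", "sarah", "emily", "jessica", "ashley", "jennifer", "samantha", "elizabeth", "lisa"]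

-- literal port of A: name.split()[0].lower(), two known-name checks, then five any(h in words_lower) scans.
-- name.split()[0] raises IndexError when name has no words: that case is excluded by Pre_ (junk branch below).
def infer_gender_py (name : String) (words_lower : List String) : String :=
  match PySem.List.pyGet? (PySem.Str.split₀ name) 0 with
  | none => "unknown"  -- unreachable under Pre_infer_gender_py (Python raises IndexError)
  | some w0 =>
    let first := PySem.Str.lower w0
    if PySem.Set.contains knownMaleNames first then "masculine"
    else if PySem.Set.contains knownFemaleNames first then "feminine"
    else if pluralHints.any (fun h => words_lower.contains h) then "plural"
    else if femaleHints.any (fun h => words_lower.contains h) then "feminine"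
    else if maleHints.any (fun h => words_lower.contains h) then "masculine"
    else if animalHints.any (fun h => words_lower.contains h) then "neuter"
    else if objectHints.any (fun h => words_lower.contains h) then "neuter"
    else "unknown"

-- ===== PORT B =====
-- B's category word strings (whitespace-joined), priorities 0 plural > 1 feminine > 2 masculine > 3 neuter
def pluralStrB : String := "they them their themselves we us our team group people children kids students players members staff"
def feminineStrB : String := "she her hers herself ms mrs miss madam queen princess duchess lady girl woman women female sister mother daughter aunt niece wife girlfriend grandmother granddaughter actress nun priestess"
def masculineStrB : String := "he him his himself mr sir king prince duke lord boy man men male brother father son uncle nephew husband boyfriend grandfather grandson actor monk priest"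
def neuterStrB : String := "cat dog bird fish horse lion tiger bear elephant monkey snake rabbit wolf fox deer cow bull sheep goat pig chicken duck eagle parrot turtle frog ball car bike book phone laptop table chair bag bottle pen pencil camera watch ring key door window box bag cup plate knife sword gun ship plane train"
def maleNamesStrB : String := "arnab rahul amit raj rohan arjun vikram suresh deepak ravi arun anand sanjay ajay vijay nikhil kartik aman karan rajan mohan ramesh dinesh umesh ganesh mahesh sachin rohit virat dhruv ishaan lakshman devraj surya john james robert william richard charles michael david peter paul george henry edward thomas joseph mark"
def femaleNamesStrB : String := "priya pooja anita sunita kavita rina meera divya neha sneha radha sita lakshmi parvati durga saraswati rekha usha geeta seema leela mala vimla shobha sudha jyoti nisha ritu sweta shreya anjali komal sonam riya tanya emma olivia sophia isabella charlotte ava mia amelia sarah emily jessica ashley jennifer samantha elizabeth lisa"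

-- Source B builds _PRIO/_KNOWN with dict.setdefault (FIRST binding wins): exact as an association
-- list in insertion order with first-match lookup (List.lookup)
def prioTable : List (String × Nat) :=
  (PySem.Str.split₀ pluralStrB).map (fun w => (w, 0))
  ++ (PySem.Str.split₀ feminineStrB).map (fun w => (w, 1))
  ++ (PySem.Str.split₀ masculineStrB).map (fun w => (w, 2))
  ++ (PySem.Str.split₀ neuterStrB).map (fun w => (w, 3))

def knownTable : List (String × String) :=
  (PySem.Str.split₀ maleNamesStrB).map (fun w => (w, "masculine"))
  ++ (PySem.Str.split₀ femaleNamesStrB).map (fun w => (w, "feminine"))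

def wordPrio (w : String) : Nat := (prioTable.lookup w).getD 4

def genderLabels : List String := ["plural", "feminine", "masculine", "neuter", "unknown"]

-- the 'for w in words_lower: if best == 0: break; best = min(best, _PRIO.get(w, 4))' loop
def bestPrio : List String → Nat → Nat
  | [], best => best
  | w :: ws, best => if best = 0 then best else bestPrio ws (min best (wordPrio w))

-- port of B: known-name table lookup, then ONE pass over words_lower with an early break
def infer_gender_py_alt (name : String) (words_lower : List String) : String :=
  match PySem.List.pyGet? (PySem.Str.split₀ name) 0 with
  | none => "unknown"  -- unreachable under Pre_infer_gender_py (Python raises IndexError)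
  | some w0 =>
    match knownTable.lookup (PySem.Str.lower w0) with
    | some g => g
    | none => genderLabels.getD (bestPrio words_lower 4) "unknown"

-- ===== PRECONDITION & SPEC =====
-- Pre_ excludes names with no words (empty/whitespace-only), on which A's name.split()[0] raises IndexError.
def Pre_infer_gender_py (name : String) (words_lower : List String) : Prop :=
  PySem.Str.split₀ name ≠ []
instance (name : String) (words_lower : List String) : Decidable (Pre_infer_gender_py name words_lower) := by unfold Pre_infer_gender_py; infer_instance

def pvWitness_infer_gender_py : String × List String := ("zog", ["cat", "she"])

def Spec_infer_gender_py (name : String) (words_lower : List String) (out : String) : Prop := out = infer_gender_py_alt name words_lower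
instance (name : String) (words_lower : List String) (out : String) : Decidable (Spec_infer_gender_py name words_lower out) := by unfold Spec_infer_gender_py; infer_instance

-- ===== CLAIM (what is proved, stated in full; the proofs are below) =====
def Claim_equal_infer_gender_py : Prop := ∀ (name : String) (words_lower : List String), Dom_infer_gender_py name words_lower → Pre_infer_gender_py name words_lower → Spec_infer_gender_py name words_lower (infer_gender_py name words_lower)

-- ===== LEMMAS AND PROOFS =====

-- first-match lookup in a one-priority block
lemma lookup_map_pair {β : Type} (p : β) (ws : List String) (w : String) :
    ((ws.map (fun x => (x, p))).lookup w) = if ws.contains w then some p else none := by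
  induction ws with
  | nil => simp
  | cons x xs ih =>
    cases h : w == x with
    | true => simp [List.lookup, h, beq_iff_eq.mp h]
    | false =>
      have hne : ¬ w = x := by simpa using h
      simp [List.lookup, h, ih, hne]

lemma lookup_append {β : Type} (l₁ l₂ : List (String × β)) (w : String) :
    (l₁ ++ l₂).lookup w = ((l₁.lookup w).orElse (fun _ => l₂.lookup w)) := by
  induction l₁ with
  | nil => simp [Option.orElse]
  | cons x xs ih =>
    obtain ⟨k, v⟩ := x
    cases h : w == k with
    | true => simp [List.lookup, h, Option.orElse]
    | false => simp [List.lookup, h, ih, Option.orElse]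

-- the concrete word strings split into exactly A's hint lists
set_option maxRecDepth 100000 in
lemma split_plural : PySem.Str.split₀ pluralStrB = ["they", "them", "their", "themselves", "we", "us", "our", "team", "group", "people", "children", "kids", "students", "players", "members", "staff"] := by decide
set_option maxRecDepth 100000 in
lemma split_feminine : PySem.Str.split₀ feminineStrB = ["she", "her", "hers", "herself", "ms", "mrs", "miss", "madam", "queen", "princess", "duchess", "lady", "girl", "woman", "women", "female", "sister", "mother", "daughter", "aunt", "niece", "wife", "girlfriend", "grandmother", "granddaughter", "actress", "nun", "priestess"] := by decide
set_option maxRecDepth 100000 in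
lemma split_masculine : PySem.Str.split₀ masculineStrB = ["he", "him", "his", "himself", "mr", "sir", "king", "prince", "duke", "lord", "boy", "man", "men", "male", "brother", "father", "son", "uncle", "nephew", "husband", "boyfriend", "grandfather", "grandson", "actor", "monk", "priest"] := by decide
set_option maxRecDepth 100000 in
lemma split_neuter : PySem.Str.split₀ neuterStrB = ["cat", "dog", "bird", "fish", "horse", "lion", "tiger", "bear", "elephant", "monkey", "snake", "rabbit", "wolf", "fox", "deer", "cow", "bull", "sheep", "goat", "pig", "chicken", "duck", "eagle", "parrot", "turtle", "frog"] ++ ["ball", "car", "bike", "book", "phone", "laptop", "table", "chair", "bag", "bottle", "pen", "pencil", "camera", "watch", "ring", "key", "door", "window", "box", "bag", "cup", "plate", "knife", "sword", "gun", "ship", "plane", "train"] := by decide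
set_option maxRecDepth 100000 in
lemma split_maleNames : PySem.Str.split₀ maleNamesStrB = ["arnab", "rahul", "amit", "raj", "rohan", "arjun", "vikram", "suresh", "deepak", "ravi", "arun", "anand", "sanjay", "ajay", "vijay", "nikhil", "kartik", "aman", "karan", "rajan", "mohan", "ramesh", "dinesh", "umesh", "ganesh", "mahesh", "sachin", "rohit", "virat", "dhruv", "ishaan", "lakshman", "devraj", "surya", "john", "james", "robert", "william", "richard", "charles", "michael", "david", "peter", "paul", "george", "henry", "edward", "thomas", "joseph", "mark"] := by decide
set_option maxRecDepth 100000 in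
lemma split_femaleNames : PySem.Str.split₀ femaleNamesStrB = ["priya", "pooja", "anita", "sunita", "kavita", "rina", "meera", "divya", "neha", "sneha", "radha", "sita", "lakshmi", "parvati", "durga", "saraswati", "rekha", "usha", "geeta", "seema", "leela", "mala", "vimla", "shobha", "sudha", "jyoti", "nisha", "ritu", "sweta", "shreya", "anjali", "komal", "sonam", "riya", "tanya", "emma", "olivia", "sophia", "isabella", "charlotte", "ava", "mia", "amelia", "sarah", "emily", "jessica", "ashley", "jennifer", "samantha", "elizabeth", "lisa"] := by decide

-- membership in a PySem.Set built from a literal list = membership in the list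
lemma set_contains_ofList (L : List String) (w : String) :
    PySem.Set.contains (PySem.Set.ofList L) w = L.contains w := by
  simp [PySem.Set.contains_iff, PySem.Set.mem_ofList, List.contains_iff_mem]

-- first-match lookup in a four-block priority table, generically
lemma chain4 (l0 l1 l2 l3 : List String) (w : String) :
    (((l0.map (fun x => (x, (0:Nat))) ++ l1.map (fun x => (x, 1))
       ++ l2.map (fun x => (x, 2)) ++ l3.map (fun x => (x, 3))).lookup w).getD 4)
    = (if l0.contains w then 0 else if l1.contains w then 1
       else if l2.contains w then 2 else if l3.contains w then 3 else 4 : Nat) := by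
  rw [lookup_append, lookup_append, lookup_append,
      lookup_map_pair, lookup_map_pair, lookup_map_pair, lookup_map_pair]
  cases h0 : l0.contains w <;> cases h1 : l1.contains w <;> cases h2 : l2.contains w <;>
    cases h3 : l3.contains w <;> simp [h0, h1, h2, h3, Option.orElse]

-- first-match lookup in a two-block labelled table, generically
lemma chain2 (l0 l1 : List String) (a b w : String) :
    ((l0.map (fun x => (x, a)) ++ l1.map (fun x => (x, b))).lookup w)
    = (if l0.contains w then some a else if l1.contains w then some b else none) := by
  rw [lookup_append, lookup_map_pair, lookup_map_pair]
  cases h0 : l0.contains w <;> cases h1 : l1.contains w <;> simp [h0, h1, Option.orElse]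

-- B's per-word priority, characterised by A's hint sets
lemma wordPrio_eq (w : String) :
    wordPrio w =
      (if PySem.Set.contains pluralHints w then 0
       else if PySem.Set.contains femaleHints w then 1
       else if PySem.Set.contains maleHints w then 2
       else if PySem.Set.contains animalHints w || PySem.Set.contains objectHints w then 3
       else 4 : Nat) := by
  unfold wordPrio prioTable
  rw [chain4, split_plural, split_feminine, split_masculine, split_neuter]
  unfold pluralHints femaleHints maleHints animalHints objectHints
  rw [set_contains_ofList, set_contains_ofList, set_contains_ofList,
      set_contains_ofList, set_contains_ofList, ← List.contains_append]

-- B's known-name table, characterised by A's name sets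
lemma knownTable_lookup (w : String) :
    knownTable.lookup w =
      (if PySem.Set.contains knownMaleNames w then some "masculine"
       else if PySem.Set.contains knownFemaleNames w then some "feminine"
       else none) := by
  unfold knownTable
  rw [chain2, split_maleNames, split_femaleNames]
  unfold knownMaleNames knownFemaleNames
  rw [set_contains_ofList, set_contains_ofList]

-- the running minimum after the fold is ≤ k iff the start is or some word's priority is
lemma foldl_min_le_iff (k : Nat) : ∀ (ws : List String) (a : Nat),
    (ws.foldl (fun b w => min b (wordPrio w)) a ≤ k) ↔ (a ≤ k ∨ ∃ w ∈ ws, wordPrio w ≤ k) := by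
  intro ws
  induction ws with
  | nil => simp
  | cons w ws ih =>
    intro a
    simp only [List.foldl_cons, ih, min_le_iff, List.mem_cons]
    aesop

lemma foldl_min_zero : ∀ (ws : List String), ws.foldl (fun b w => min b (wordPrio w)) 0 = 0 := by
  intro ws
  induction ws with
  | nil => rfl
  | cons w ws ih => simpa using ih

-- the early-break loop computes the same minimum as the plain fold
lemma bestPrio_eq_foldl : ∀ (ws : List String) (b : Nat),
    bestPrio ws b = ws.foldl (fun b w => min b (wordPrio w)) b := by
  intro ws
  induction ws with
  | nil => intro b; rfl
  | cons w ws ih =>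
    intro b
    by_cases hb : b = 0
    · subst hb
      simp only [bestPrio, if_pos rfl, List.foldl_cons, Nat.zero_min]
      exact (foldl_min_zero ws).symm
    · simp only [bestPrio, if_neg hb, List.foldl_cons, ih]

lemma wordPrio_le_zero (w : String) :
    wordPrio w ≤ 0 ↔ PySem.Set.contains pluralHints w = true := by
  rw [wordPrio_eq]; split_ifs <;> simp_all

lemma wordPrio_le_one (w : String) :
    wordPrio w ≤ 1 ↔ (PySem.Set.contains pluralHints w = true ∨
      PySem.Set.contains femaleHints w = true) := by
  rw [wordPrio_eq]; split_ifs <;> simp_all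

lemma wordPrio_le_two (w : String) :
    wordPrio w ≤ 2 ↔ (PySem.Set.contains pluralHints w = true ∨
      PySem.Set.contains femaleHints w = true ∨ PySem.Set.contains maleHints w = true) := by
  rw [wordPrio_eq]; split_ifs <;> simp_all

lemma wordPrio_le_three (w : String) :
    wordPrio w ≤ 3 ↔ (PySem.Set.contains pluralHints w = true ∨
      PySem.Set.contains femaleHints w = true ∨ PySem.Set.contains maleHints w = true ∨
      PySem.Set.contains animalHints w = true ∨ PySem.Set.contains objectHints w = true) := by
  rw [wordPrio_eq]; split_ifs <;> simp_all

-- A's scan of a hint set against words_lower finds something iff some word lies in the hint set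
lemma any_flip (S : PySem.Set String) (ws : List String) :
    (S.any (fun h => ws.contains h) = true) ↔ ∃ w ∈ ws, PySem.Set.contains S w = true := by
  simp only [List.any_eq_true, List.contains_iff_mem, PySem.Set.contains_iff]
  exact ⟨fun ⟨h, hS, hw⟩ => ⟨h, hw, hS⟩, fun ⟨w, hw, hS⟩ => ⟨w, hS, hw⟩⟩

-- the heart: A's five-scan chain equals B's label of the minimum priority
lemma chain_eq_label (ws : List String) :
    (if pluralHints.any (fun h => ws.contains h) then "plural"
     else if femaleHints.any (fun h => ws.contains h) then "feminine"
     else if maleHints.any (fun h => ws.contains h) then "masculine"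
     else if animalHints.any (fun h => ws.contains h) then "neuter"
     else if objectHints.any (fun h => ws.contains h) then "neuter"
     else "unknown")
    = genderLabels.getD (ws.foldl (fun b w => min b (wordPrio w)) 4) "unknown" := by
  have hb4 : ws.foldl (fun b w => min b (wordPrio w)) 4 ≤ 4 :=
    (foldl_min_le_iff 4 ws 4).mpr (Or.inl le_rfl)
  by_cases h0 : pluralHints.any (fun h => ws.contains h) = true
  · obtain ⟨w, hw, hS⟩ := (any_flip _ _).mp h0
    have hle : ws.foldl (fun b w => min b (wordPrio w)) 4 ≤ 0 :=
      (foldl_min_le_iff 0 ws 4).mpr (Or.inr ⟨w, hw, (wordPrio_le_zero w).mpr hS⟩)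
    have hF : ws.foldl (fun b w => min b (wordPrio w)) 4 = 0 := by omega
    rw [if_pos h0, hF]; rfl
  · have hgt0 : ¬ ws.foldl (fun b w => min b (wordPrio w)) 4 ≤ 0 := by
      intro hc
      rcases (foldl_min_le_iff 0 ws 4).mp hc with h | ⟨w, hw, hp⟩
      · omega
      · exact h0 ((any_flip _ _).mpr ⟨w, hw, (wordPrio_le_zero w).mp hp⟩)
    rw [if_neg h0]
    by_cases h1 : femaleHints.any (fun h => ws.contains h) = true
    · obtain ⟨w, hw, hS⟩ := (any_flip _ _).mp h1
      have hle : ws.foldl (fun b w => min b (wordPrio w)) 4 ≤ 1 :=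
        (foldl_min_le_iff 1 ws 4).mpr (Or.inr ⟨w, hw, (wordPrio_le_one w).mpr (Or.inr hS)⟩)
      have hF : ws.foldl (fun b w => min b (wordPrio w)) 4 = 1 := by omega
      rw [if_pos h1, hF]; rfl
    · have hgt1 : ¬ ws.foldl (fun b w => min b (wordPrio w)) 4 ≤ 1 := by
        intro hc
        rcases (foldl_min_le_iff 1 ws 4).mp hc with h | ⟨w, hw, hp⟩
        · omega
        · rcases (wordPrio_le_one w).mp hp with hS | hS
          · exact h0 ((any_flip _ _).mpr ⟨w, hw, hS⟩)
          · exact h1 ((any_flip _ _).mpr ⟨w, hw, hS⟩)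
      rw [if_neg h1]
      by_cases h2 : maleHints.any (fun h => ws.contains h) = true
      · obtain ⟨w, hw, hS⟩ := (any_flip _ _).mp h2
        have hle : ws.foldl (fun b w => min b (wordPrio w)) 4 ≤ 2 :=
          (foldl_min_le_iff 2 ws 4).mpr
            (Or.inr ⟨w, hw, (wordPrio_le_two w).mpr (Or.inr (Or.inr hS))⟩)
        have hF : ws.foldl (fun b w => min b (wordPrio w)) 4 = 2 := by omega
        rw [if_pos h2, hF]; rfl
      · have hgt2 : ¬ ws.foldl (fun b w => min b (wordPrio w)) 4 ≤ 2 := by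
          intro hc
          rcases (foldl_min_le_iff 2 ws 4).mp hc with h | ⟨w, hw, hp⟩
          · omega
          · rcases (wordPrio_le_two w).mp hp with hS | hS | hS
            · exact h0 ((any_flip _ _).mpr ⟨w, hw, hS⟩)
            · exact h1 ((any_flip _ _).mpr ⟨w, hw, hS⟩)
            · exact h2 ((any_flip _ _).mpr ⟨w, hw, hS⟩)
        rw [if_neg h2]
        by_cases h3 : animalHints.any (fun h => ws.contains h) = true
        · obtain ⟨w, hw, hS⟩ := (any_flip _ _).mp h3
          have hle : ws.foldl (fun b w => min b (wordPrio w)) 4 ≤ 3 :=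
            (foldl_min_le_iff 3 ws 4).mpr
              (Or.inr ⟨w, hw, (wordPrio_le_three w).mpr (Or.inr (Or.inr (Or.inr (Or.inl hS))))⟩)
          have hF : ws.foldl (fun b w => min b (wordPrio w)) 4 = 3 := by omega
          rw [if_pos h3, hF]; rfl
        · rw [if_neg h3]
          by_cases h4 : objectHints.any (fun h => ws.contains h) = true
          · obtain ⟨w, hw, hS⟩ := (any_flip _ _).mp h4
            have hle : ws.foldl (fun b w => min b (wordPrio w)) 4 ≤ 3 :=
              (foldl_min_le_iff 3 ws 4).mpr
                (Or.inr ⟨w, hw, (wordPrio_le_three w).mpr (Or.inr (Or.inr (Or.inr (Or.inr hS))))⟩)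
            have hF : ws.foldl (fun b w => min b (wordPrio w)) 4 = 3 := by omega
            rw [if_pos h4, hF]; rfl
          · have hgt3 : ¬ ws.foldl (fun b w => min b (wordPrio w)) 4 ≤ 3 := by
              intro hc
              rcases (foldl_min_le_iff 3 ws 4).mp hc with h | ⟨w, hw, hp⟩
              · omega
              · rcases (wordPrio_le_three w).mp hp with hS | hS | hS | hS | hS
                · exact h0 ((any_flip _ _).mpr ⟨w, hw, hS⟩)
                · exact h1 ((any_flip _ _).mpr ⟨w, hw, hS⟩)
                · exact h2 ((any_flip _ _).mpr ⟨w, hw, hS⟩)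
                · exact h3 ((any_flip _ _).mpr ⟨w, hw, hS⟩)
                · exact h4 ((any_flip _ _).mpr ⟨w, hw, hS⟩)
            have hF : ws.foldl (fun b w => min b (wordPrio w)) 4 = 4 := by omega
            rw [if_neg h4, hF]; rfl

-- ===== VERDICT (by name: the statement is the Claim_ definition above) =====
theorem infer_gender_py_spec : Claim_equal_infer_gender_py := by
  intro name ws _hdom _hpre
  unfold Spec_infer_gender_py infer_gender_py infer_gender_py_alt
  cases PySem.List.pyGet? (PySem.Str.split₀ name) 0 with
  | none => rfl
  | some w0 =>
    dsimp only
    rw [knownTable_lookup, bestPrio_eq_foldl]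
    by_cases hm : PySem.Set.contains knownMaleNames (PySem.Str.lower w0) = true
    · rw [if_pos hm, if_pos hm]
    · rw [if_neg hm, if_neg hm]
      by_cases hf : PySem.Set.contains knownFemaleNames (PySem.Str.lower w0) = true
      · rw [if_pos hf, if_pos hf]
      · rw [if_neg hf, if_neg hf]
        exact chain_eq_label ws
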